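-- pv_equiv track=rewrite | github.com/HowlsCastle97/CS3022-Labs | pease_number.py | collatz_converges
-- ===== SOURCE A (Python) =====
-- def collatz_converges(n, seen=None, max_steps=10000):
--     if seen is None:
--         seen = set()
--
--     if n == 1:
--         return True
--
--     if n in seen:
--         return False
--
--     if len(seen) >= max_steps:
--         return False
--
--     new_seen = seen | {n}
--
--     if n % 2 == 0:
--         return collatz_converges(n // 2, new_seen, max_steps)
--     else:
--         return collatz_converges(3 * n + 1, new_seen, max_steps)
-- ===== SOURCE B (Python) =====
-- def collatz_converges(n, seen=None, max_steps=10000):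
--     # Iterative loop with a precomputed decrementing step budget instead of
--     # A's recursion that re-measures the growing set each call.
--     seen = set() if seen is None else set(seen)
--     budget = max_steps - len(seen)
--     while True:
--         if n == 1:
--             return True
--         if n in seen:
--             return False
--         if budget <= 0:
--             return False
--         seen.add(n)
--         budget -= 1
--         n = n // 2 if n % 2 == 0 else 3 * n + 1
-- ===== Notes on version B (the rewrite author's own statement) =====
-- stated objective: idiomatic
-- what changed: Replaces A's tail recursion (which rebuilds seen | {n} and re-measures len(seen) every call) by an iterative while-loop over a copied set with a step budget computed once and decremented, avoiding Python recursion-depth limits.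
import Mathlib
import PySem

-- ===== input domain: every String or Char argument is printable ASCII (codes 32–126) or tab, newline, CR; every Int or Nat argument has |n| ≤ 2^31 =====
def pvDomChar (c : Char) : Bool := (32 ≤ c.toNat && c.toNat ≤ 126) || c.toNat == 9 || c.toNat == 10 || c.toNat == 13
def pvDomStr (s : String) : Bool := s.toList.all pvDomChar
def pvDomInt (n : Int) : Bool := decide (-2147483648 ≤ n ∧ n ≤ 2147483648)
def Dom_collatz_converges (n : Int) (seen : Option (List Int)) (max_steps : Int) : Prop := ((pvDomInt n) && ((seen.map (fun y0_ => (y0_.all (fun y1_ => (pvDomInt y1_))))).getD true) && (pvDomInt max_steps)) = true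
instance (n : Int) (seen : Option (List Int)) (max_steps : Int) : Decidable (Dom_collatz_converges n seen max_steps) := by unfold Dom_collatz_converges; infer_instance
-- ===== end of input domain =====

-- B replaces A's tail recursion by a while-loop with a decrementing step budget; return value only, B copies the caller's set.
-- ===== PORT A =====
-- recursive body of A; measure: each recursive call grows seen by one element while len(seen) < max_steps
def collatzA (max_steps : Int) (n : Int) (seen : PySem.Set Int) : Bool :=
  if n = 1 then true
  else if PySem.Set.contains seen n then false
  else if max_steps ≤ (PySem.Set.len seen : Int) then false
  else if PySem.Int.mod n 2 = 0 then
    collatzA max_steps (PySem.Int.floordiv n 2) (PySem.Set.add seen n)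
  else
    collatzA max_steps (3 * n + 1) (PySem.Set.add seen n)
termination_by (max_steps - seen.length).toNat
decreasing_by
  all_goals
    simp only [PySem.Set.add, PySem.Set.contains, PySem.Set.len] at *
    split <;> simp_all <;> omega

def collatz_converges (n : Int) (seen : Option (List Int)) (max_steps : Int) : Bool :=
  collatzA max_steps n (seen.getD [])    -- 'if seen is None: seen = set()'

-- ===== PORT B =====
-- loop of B: structural recursion on the budget; 'budget <= 0' is the budget being exhausted (toNat of a non-positive Int is 0)
def collatzB (n : Int) (seen : PySem.Set Int) (budget : Nat) : Bool :=
  if n = 1 then true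
  else if PySem.Set.contains seen n then false
  else match budget with
    | 0 => false
    | b + 1 =>
      collatzB (if PySem.Int.mod n 2 = 0 then PySem.Int.floordiv n 2 else 3 * n + 1)
        (PySem.Set.add seen n) b

def collatz_converges_alt (n : Int) (seen : Option (List Int)) (max_steps : Int) : Bool :=
  let s := PySem.Set.ofList (seen.getD [])   -- 'set() if seen is None else set(seen)'
  collatzB n s (max_steps - (PySem.Set.len s : Int)).toNat

-- ===== PRECONDITION & SPEC =====
-- Pre_ only states the type-convention shape of the 'seen' argument: it encodes a Python set, so its list of elements is duplicate-free.
def Pre_collatz_converges (n : Int) (seen : Option (List Int)) (max_steps : Int) : Prop :=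
  (seen.getD []).Nodup
instance (n : Int) (seen : Option (List Int)) (max_steps : Int) : Decidable (Pre_collatz_converges n seen max_steps) := by unfold Pre_collatz_converges; infer_instance

def pvWitness_collatz_converges : Int × Option (List Int) × Int := (6, some [3, 10], 20)

def Spec_collatz_converges (n : Int) (seen : Option (List Int)) (max_steps : Int) (out : Bool) : Prop := out = collatz_converges_alt n seen max_steps
instance (n : Int) (seen : Option (List Int)) (max_steps : Int) (out : Bool) : Decidable (Spec_collatz_converges n seen max_steps out) := by unfold Spec_collatz_converges; infer_instance

-- ===== CLAIM (what is proved, stated in full; the proofs are below) =====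
def Claim_equal_collatz_converges : Prop := ∀ (n : Int) (seen : Option (List Int)) (max_steps : Int), Dom_collatz_converges n seen max_steps → Pre_collatz_converges n seen max_steps → Spec_collatz_converges n seen max_steps (collatz_converges n seen max_steps)

-- ===== LEMMAS AND PROOFS =====

theorem collatzA_eq_collatzB (max_steps : Int) :
    ∀ (b : Nat) (n : Int) (seen : List Int),
      b = (max_steps - (seen.length : Int)).toNat →
      collatzA max_steps n seen = collatzB n seen b := by
  intro b
  induction b with
  | zero =>
    intro n seen hb
    rw [collatzA, collatzB]
    by_cases h1 : n = 1
    · simp [h1]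
    by_cases h2 : n ∈ seen
    · simp [h1, h2]
    have hge : max_steps ≤ (seen.length : Int) := by omega
    simp [h1, h2, hge, PySem.Set.len]
  | succ b ih =>
    intro n seen hb
    have hlt : (seen.length : Int) < max_steps := by omega
    rw [collatzA, collatzB]
    by_cases h1 : n = 1
    · simp [h1]
    by_cases h2 : n ∈ seen
    · simp [h1, h2]
    have hlen : (PySem.Set.add seen n).length = seen.length + 1 := by
      rw [PySem.Set.add_of_not_mem h2]; simp
    have hrec : ∀ m : Int,
        collatzA max_steps m (PySem.Set.add seen n) = collatzB m (PySem.Set.add seen n) b :=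
      fun m => ih m _ (by rw [hlen]; omega)
    simp only [PySem.Set.add_of_not_mem h2] at hrec
    by_cases h3 : (2 : Int) ∣ n
    · simp [h1, h2, h3, not_le.mpr hlt, PySem.Set.len, hrec]
    · simp [h1, h2, h3, not_le.mpr hlt, PySem.Set.len, hrec]

-- ===== VERDICT (by name: the statement is the Claim_ definition above) =====
theorem collatz_converges_spec : Claim_equal_collatz_converges := by
  intro n seen max_steps _ hpre
  have hnd : (seen.getD []).Nodup := hpre
  unfold Spec_collatz_converges collatz_converges collatz_converges_alt
  simp only [PySem.Set.ofList_eq_self_of_nodup _ hnd, PySem.Set.len]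
  exact collatzA_eq_collatzB max_steps _ n _ rfl
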